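-- pv_equiv track=rewrite | github.com/LaceLetho/getnews | crypto_news_analyzer/datasource_payloads.py | _contains_inline_secret_token
-- ===== SOURCE A (Python) =====
-- TELEGRAM_INLINE_SECRET_KEY_TOKENS = (
--     "authorization",
--     "proxy-authorization",
--     "cookie",
--     "set-cookie",
--     "x-api-key",
--     "api-key",
--     "apikey",
--     "api_key",
--     "token",
--     "access_token",
--     "refresh_token",
--     "bearer",
--     "secret",
--     "password",
--     "passwd",
--     "session",
--     "session_string",
--     "api_id",
--     "api_hash",
--     "phone",
--     "auth",
-- )
--
-- def _contains_inline_secret_token(normalized_key: str) -> bool: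
--     normalized_variants = {
--         normalized_key,
--         normalized_key.replace("_", "-"),
--         normalized_key.replace("-", "_"),
--     }
--     return any(
--         token in variant
--         for token in TELEGRAM_INLINE_SECRET_KEY_TOKENS
--         for variant in normalized_variants
--     )
-- ===== SOURCE B (Python) =====
-- TELEGRAM_INLINE_SECRET_KEY_TOKENS = (
--     "authorization",
--     "proxy-authorization",
--     "cookie",
--     "set-cookie",
--     "x-api-key",
--     "api-key",
--     "apikey",
--     "api_key",
--     "token",
--     "access_token",
--     "refresh_token",
--     "bearer",
--     "secret",
--     "password",
--     "passwd",
--     "session",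
--     "session_string",
--     "api_id",
--     "api_hash",
--     "phone",
--     "auth",
-- )
--
-- def _contains_inline_secret_token(normalized_key: str) -> bool:
--     # Canonicalize separators once: every '_' becomes '-', in both key and token,
--     # then a single flat containment loop replaces the variant set x token product.
--     canonical = normalized_key.replace("_", "-")
--     for token in TELEGRAM_INLINE_SECRET_KEY_TOKENS:
--         if token.replace("_", "-") in canonical:
--             return True
--     return False
-- ===== Notes on version B (the rewrite author's own statement) =====
-- stated objective: simpler
-- what changed: Instead of building a 3-element set of key variants and testing every token against every variant, B canonicalizes separators once ('_'->'-') in both the key and each token and does one flat containment loop; the variant set and the inner loop disappear.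
import Mathlib
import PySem

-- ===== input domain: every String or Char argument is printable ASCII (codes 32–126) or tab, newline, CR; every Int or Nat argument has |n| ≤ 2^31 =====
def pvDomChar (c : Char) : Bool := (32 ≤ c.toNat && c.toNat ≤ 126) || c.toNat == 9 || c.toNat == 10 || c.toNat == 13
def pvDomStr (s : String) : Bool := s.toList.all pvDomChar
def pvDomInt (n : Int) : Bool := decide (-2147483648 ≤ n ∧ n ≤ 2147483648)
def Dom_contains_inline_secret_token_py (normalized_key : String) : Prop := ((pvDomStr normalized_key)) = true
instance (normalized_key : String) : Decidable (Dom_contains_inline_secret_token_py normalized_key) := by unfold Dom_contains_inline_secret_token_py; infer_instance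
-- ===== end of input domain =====

-- B canonicalizes '_'->'-' in key and token once and does one flat containment loop,
-- replacing A's 3-variant set and its nested any; objective: simpler (same asymptotic cost).


-- the module constant TELEGRAM_INLINE_SECRET_KEY_TOKENS (shared by both modules)
def pvTELEGRAM_TOKENS : List String :=
  ["authorization", "proxy-authorization", "cookie", "set-cookie", "x-api-key",
   "api-key", "apikey", "api_key", "token", "access_token", "refresh_token",
   "bearer", "secret", "password", "passwd", "session", "session_string",
   "api_id", "api_hash", "phone", "auth"]

-- ===== PORT A =====
def contains_inline_secret_token_py (normalized_key : String) : Bool :=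
  let normalized_variants : PySem.Set String :=
    PySem.Set.ofList
      [normalized_key,
       PySem.Str.replace normalized_key "_" "-",
       PySem.Str.replace normalized_key "-" "_"]
  pvTELEGRAM_TOKENS.any (fun token =>
    normalized_variants.any (fun variant => PySem.Str.isIn token variant))

-- ===== PORT B =====
def contains_inline_secret_token_py_alt (normalized_key : String) : Bool :=
  let canonical := PySem.Str.replace normalized_key "_" "-"
  pvTELEGRAM_TOKENS.any (fun token =>
    PySem.Str.isIn (PySem.Str.replace token "_" "-") canonical)

-- ===== PRECONDITION & SPEC =====
def Spec_contains_inline_secret_token_py (normalized_key : String) (out : Bool) : Prop := out = contains_inline_secret_token_py_alt normalized_key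
instance (normalized_key : String) (out : Bool) : Decidable (Spec_contains_inline_secret_token_py normalized_key out) := by unfold Spec_contains_inline_secret_token_py; infer_instance

-- ===== CLAIM (what is proved, stated in full; the proofs are below) =====
def Claim_equal_contains_inline_secret_token_py : Prop := ∀ (normalized_key : String), Dom_contains_inline_secret_token_py normalized_key → Spec_contains_inline_secret_token_py normalized_key (contains_inline_secret_token_py normalized_key)

-- ===== LEMMAS AND PROOFS =====

-- the two single-character separator maps
def pvF (c : Char) : Char := if c = '_' then '-' else c
def pvG (c : Char) : Char := if c = '-' then '_' else c

-- replace with single-character old/new is a character map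
theorem pv_go_map (a b : Char) (l acc : List Char) (fuel : Nat) (h : l.length ≤ fuel) :
    PySem.Chars.replace.go [a] [b] fuel l acc =
      acc.reverse ++ l.map (fun c => if c = a then b else c) := by
  induction l generalizing fuel acc with
  | nil => cases fuel <;> simp [PySem.Chars.replace.go]
  | cons c t ih =>
      cases fuel with
      | zero => simp at h
      | succ n =>
        simp only [PySem.Chars.replace.go, List.isPrefixOf]
        by_cases hc : c = a
        · simp only [hc, beq_self_eq_true, Bool.true_and]
          rw [if_pos (by simp)]
          simp only [List.length_cons] at h
          simp only [List.length_cons, List.length_nil, List.drop_succ_cons, List.drop_zero]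
          rw [ih ([b].reverse ++ acc) n (by omega)]
          simp
        · rw [if_neg (by simp; exact fun h => hc h.symm)]
          simp only [List.length_cons] at h
          rw [ih (c :: acc) n (by omega)]
          simp [hc]

theorem pv_replace_map (s : List Char) (a b : Char) :
    PySem.Chars.replace s [a] [b] = s.map (fun c => if c = a then b else c) := by
  simp [PySem.Chars.replace, pv_go_map a b s [] s.length (le_refl _)]

theorem pv_map_f_f (k : List Char) : (k.map pvF).map pvF = k.map pvF := by
  simp only [List.map_map]
  apply List.map_congr_left
  intro c _
  simp only [Function.comp, pvF]
  by_cases h : c = '_' <;> simp [h]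

theorem pv_map_f_g (k : List Char) : (k.map pvG).map pvF = k.map pvF := by
  simp only [List.map_map]
  apply List.map_congr_left
  intro c _
  simp only [Function.comp, pvF, pvG]
  by_cases h : c = '-' <;> by_cases h2 : c = '_' <;> simp [h, h2]

-- lifting a pvF-image match back through pvG when the token has no '-'
theorem pv_unmap (m t : List Char) (hmt : m.map pvF = t.map pvF) (hd : '-' ∉ t) :
    m.map pvG = t := by
  induction t generalizing m with
  | nil => simpa using hmt
  | cons c tt ih =>
      cases m with
      | nil => simp at hmt
      | cons d mm =>
        simp only [List.map_cons, List.cons.injEq] at hmt ⊢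
        simp only [List.mem_cons, not_or] at hd
        refine ⟨?_, ih mm hmt.2 hd.2⟩
        have h1 := hmt.1
        simp only [pvF, pvG] at h1 ⊢
        by_cases hc : c = '_'
        · subst hc
          by_cases hdq : d = '_' <;> by_cases hdd : d = '-' <;> simp_all
        · rw [if_neg hc] at h1
          have hcd : c ≠ '-' := fun h => hd.1 h.symm
          by_cases hdq : d = '_' <;> simp_all

-- per-token equivalence: A's three variant tests = B's one canonical test
theorem pv_token_eq (t K : List Char) (h : '_' ∉ t ∨ '-' ∉ t) :
    (PySem.Chars.isIn t K || PySem.Chars.isIn t (K.map pvF) ||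
       PySem.Chars.isIn t (K.map pvG)) =
      PySem.Chars.isIn (t.map pvF) (K.map pvF) := by
  rw [Bool.eq_iff_iff]
  simp only [Bool.or_eq_true, PySem.Chars.isIn_iff_infix]
  constructor
  · rintro ((h1 | h2) | h3)
    · exact h1.map pvF
    · have := h2.map pvF
      rwa [pv_map_f_f] at this
    · have := h3.map pvF
      rwa [pv_map_f_g] at this
  · rintro ⟨l, r, hk⟩
    rw [List.append_assoc] at hk
    -- decompose K along the image occurrence
    obtain ⟨l', rest, hK, hl', hrest⟩ := List.map_eq_append_iff.mp hk.symm
    obtain ⟨m, r', hrest2, hm, hr'⟩ := List.map_eq_append_iff.mp hrest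
    rcases h with hu | hd
    · -- t has no '_': pvF fixes t, so t occurs in K.map pvF itself
      left; right
      have ht : t.map pvF = t := by
        have h1 : t.map pvF = t.map id := by
          apply List.map_congr_left
          intro c hc
          simp only [pvF, id]
          rw [if_neg]; intro hc2; exact hu (hc2 ▸ hc)
        rw [h1, List.map_id]
      refine ⟨l, r, ?_⟩
      rw [← ht, List.append_assoc]; exact hk
    · -- t has no '-': the preimage m maps to t under pvG
      right
      have hmem : m <:+: K := ⟨l', r', by rw [hK, hrest2, List.append_assoc]⟩
      have := hmem.map pvG
      rwa [pv_unmap m t hm hd] at this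

theorem pv_set_any {α : Type} [BEq α] [LawfulBEq α] (xs : List α) (p : α → Bool) :
    (PySem.Set.ofList xs).any p = xs.any p := by
  rw [Bool.eq_iff_iff]
  simp only [List.any_eq_true]
  constructor
  · rintro ⟨x, hx, hp⟩; exact ⟨x, (PySem.Set.mem_ofList xs x).mp hx, hp⟩
  · rintro ⟨x, hx, hp⟩; exact ⟨x, (PySem.Set.mem_ofList xs x).mpr hx, hp⟩

theorem pv_any_congr {α : Type} (l : List α) (p q : α → Bool)
    (h : ∀ x ∈ l, p x = q x) : l.any p = l.any q := by
  induction l with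
  | nil => rfl
  | cons x xs ih =>
      simp only [List.any_cons, h x (List.mem_cons_self), ih fun y hy => h y (List.mem_cons_of_mem x hy)]

theorem pv_tokens_sep : ∀ t ∈ pvTELEGRAM_TOKENS, '_' ∉ t.toList ∨ '-' ∉ t.toList := by
  decide

-- ===== VERDICT (by name: the statement is the Claim_ definition above) =====
theorem contains_inline_secret_token_py_spec : Claim_equal_contains_inline_secret_token_py := by
  intro key _hdom
  unfold Spec_contains_inline_secret_token_py
  unfold contains_inline_secret_token_py contains_inline_secret_token_py_alt
  simp only []
  simp only [pv_set_any]
  apply pv_any_congr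
  intro t ht
  have hsep := pv_tokens_sep t ht
  have hrepF : ∀ s : String, (PySem.Str.replace s "_" "-").toList = s.toList.map pvF := by
    intro s
    rw [PySem.Str.toList_replace]
    have : ("_" : String).toList = ['_'] := rfl
    have h2 : ("-" : String).toList = ['-'] := rfl
    rw [this, h2, pv_replace_map]
    rfl
  have hrepG : ∀ s : String, (PySem.Str.replace s "-" "_").toList = s.toList.map pvG := by
    intro s
    rw [PySem.Str.toList_replace]
    have : ("_" : String).toList = ['_'] := rfl
    have h2 : ("-" : String).toList = ['-'] := rfl
    rw [this, h2, pv_replace_map]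
    rfl
  have hA : [key, PySem.Str.replace key "_" "-", PySem.Str.replace key "-" "_"].any
      (fun variant => PySem.Str.isIn t variant) =
      (PySem.Chars.isIn t.toList key.toList ||
        PySem.Chars.isIn t.toList (key.toList.map pvF) ||
        PySem.Chars.isIn t.toList (key.toList.map pvG)) := by
    simp [PySem.Str.isIn_eq, hrepF, hrepG, Bool.or_assoc]
  rw [hA, pv_token_eq t.toList key.toList hsep]
  simp [PySem.Str.isIn_eq, hrepF]
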